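-- pv_equiv track=rewrite | github.com/jiexunshen/2025-UCAS-Web-PasswordAnalysis | analysis_1_composition.py | extract_structure_pattern
-- ===== SOURCE A (Python) =====
-- def get_char_type(char):
--     if char.islower(): return 'L'
--     if char.isupper(): return 'U'
--     if char.isdigit(): return 'D'
--     if not char.isalnum(): return 'S'
--     return 'O'
--
-- def extract_structure_pattern(password):
--     password = password.strip()
--     if not password: return None
--     pattern_parts = []
--     current_char_type = get_char_type(password[0])
--     count = 1
--     for i in range(1, len(password)):
--         next_char_type = get_char_type(password[i])
--         if next_char_type == current_char_type:
--             count += 1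
--         else:
--             pattern_parts.append(f"{current_char_type}{count}")
--             current_char_type = next_char_type
--             count = 1
--     pattern_parts.append(f"{current_char_type}{count}")
--     return "".join(pattern_parts)
-- ===== SOURCE B (Python) =====
-- def get_char_type(char):
--     if char.islower(): return 'L'
--     if char.isupper(): return 'U'
--     if char.isdigit(): return 'D'
--     if not char.isalnum(): return 'S'
--     return 'O'
--
-- def extract_structure_pattern(password):
--     # staged passes: map to types, find run-boundary indices, take pairwise differences
--     password = password.strip()
--     if not password: return None
--     types = [get_char_type(c) for c in password]
--     n = len(types)
--     cuts = [0] + [i for i in range(1, n) if types[i] != types[i - 1]] + [n]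
--     return "".join(f"{types[a]}{b - a}" for a, b in zip(cuts, cuts[1:]))
-- ===== Notes on version B (the rewrite author's own statement) =====
-- stated objective: alternative
-- what changed: A's single-pass current_type/count state machine is replaced by staged passes: map every character to its type, collect the run-boundary indices where adjacent types differ, and render each run from pairwise differences of adjacent boundary positions.
import Mathlib
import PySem

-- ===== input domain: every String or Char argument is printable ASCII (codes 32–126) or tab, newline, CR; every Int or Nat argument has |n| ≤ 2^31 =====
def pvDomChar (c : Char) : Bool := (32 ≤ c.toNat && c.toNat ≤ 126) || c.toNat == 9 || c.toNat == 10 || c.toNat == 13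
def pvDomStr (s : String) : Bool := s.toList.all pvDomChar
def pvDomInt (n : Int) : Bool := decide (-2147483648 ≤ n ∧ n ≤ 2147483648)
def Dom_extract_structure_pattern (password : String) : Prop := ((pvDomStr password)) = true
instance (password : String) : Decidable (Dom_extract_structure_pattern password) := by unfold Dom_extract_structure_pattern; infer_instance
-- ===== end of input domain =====

-- B replaces A's single-pass current_type/count state machine by staged passes:
-- map characters to their types, collect the run-boundary indices, and render each
-- run from pairwise differences of adjacent boundary positions (alternative decomposition).

-- ===== PORT A =====
-- helper get_char_type (shared: B's Python keeps the identical helper)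
def get_char_type (c : Char) : Char :=
  if PySem.Chars.islower c then 'L'
  else if PySem.Chars.isupper c then 'U'
  else if PySem.Chars.isdigit c then 'D'
  else if !(PySem.Chars.isalnum c) then 'S'
  else 'O'

-- one iteration of A's for-loop on the current char's type
-- state = (pattern_parts, current_char_type, count)
def aStep' (st : List (List Char) × Char × Int) (nt : Char) : List (List Char) × Char × Int :=
  if nt == st.2.1 then (st.1, st.2.1, st.2.2 + 1)
  else (st.1 ++ [st.2.1 :: PySem.Int.toChars st.2.2], nt, 1)

def aStep (st : List (List Char) × Char × Int) (ch : Char) : List (List Char) × Char × Int :=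
  aStep' st (get_char_type ch)

def extract_structure_pattern (password : String) : Option String :=
  let p := PySem.Chars.strip password.toList
  match p with
  | [] => none            -- if not password: return None
  | c :: rest =>
    let st := rest.foldl aStep ([], get_char_type c, 1)
    -- final append of f"{current_char_type}{count}", then "".join (exact: flatten = join with empty separator)
    some (String.ofList ((st.1 ++ [st.2.1 :: PySem.Int.toChars st.2.2]).flatten))

-- ===== PORT B =====
-- [i for i in range(1, n) if types[i] != types[i - 1]]  (the run-boundary indices)
def bBnd (ts : List Char) : List Nat :=
  (List.range' 1 (ts.length - 1)).filter (fun i => ts.getD i ' ' != ts.getD (i - 1) ' ')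

-- cuts = [0] + boundaries + [n]
def bCuts (ts : List Char) : List Nat := 0 :: (bBnd ts ++ [ts.length])

-- f"{types[a]}{b - a}" for one pair (a, b)
def bEnc (ts : List Char) (p : Nat × Nat) : List Char :=
  ts.getD p.1 ' ' :: PySem.Int.toChars ((p.2 : Int) - (p.1 : Int))

def extract_structure_pattern_alt (password : String) : Option String :=
  let p := PySem.Chars.strip password.toList
  if p = [] then none
  else
    let ts := p.map get_char_type
    let cs := bCuts ts
    some (String.ofList (((cs.zip (cs.drop 1)).map (bEnc ts)).flatten))

-- ===== PRECONDITION & SPEC =====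
def Spec_extract_structure_pattern (password : String) (out : Option String) : Prop := out = extract_structure_pattern_alt password
instance (password : String) (out : Option String) : Decidable (Spec_extract_structure_pattern password out) := by unfold Spec_extract_structure_pattern; infer_instance

-- ===== CLAIM (what is proved, stated in full; the proofs are below) =====
def Claim_equal_extract_structure_pattern : Prop := ∀ (password : String), Dom_extract_structure_pattern password → Spec_extract_structure_pattern password (extract_structure_pattern password)

-- ===== LEMMAS AND PROOFS =====

-- proof-only helpers: the run-length encoding of a type list, built from the right
def consRun (t : Char) (m : Nat) (rs : List (Char × Nat)) : List (Char × Nat) :=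
  match rs with
  | [] => [(t, m)]
  | (v, k) :: r => if t = v then (t, m + k) :: r else (t, m) :: (v, k) :: r

def runsL : List Char → List (Char × Nat)
  | [] => []
  | t :: ts => consRun t 1 (runsL ts)

def render (rs : List (Char × Nat)) : List (List Char) :=
  rs.map (fun p => p.1 :: PySem.Int.toChars (p.2 : Int))

-- partial sums of run lengths starting at offset a
def psums : List Nat → Nat → List Nat
  | [], _ => []
  | k :: ks, a => (a + k) :: psums ks (a + k)

-- the final 'append last segment' step of A, as a function of the loop state
def aFinish (st : List (List Char) × Char × Int) : List (List Char) :=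
  st.1 ++ [st.2.1 :: PySem.Int.toChars st.2.2]

theorem consRun_ex (u : Char) (m : Nat) (rs : List (Char × Nat)) :
    ∃ k r, consRun u m rs = (u, k) :: r := by
  cases rs with
  | nil => exact ⟨m, [], rfl⟩
  | cons p r =>
    obtain ⟨v, k⟩ := p
    by_cases h : u = v
    · exact ⟨m + k, r, by simp [consRun, h]⟩
    · exact ⟨m, (v, k) :: r, by simp [consRun, h]⟩

theorem consRun_succ (t : Char) (m : Nat) (rs : List (Char × Nat)) :
    consRun t (m + 1) rs = consRun t m (consRun t 1 rs) := by
  cases rs with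
  | nil => simp [consRun]
  | cons p r =>
    obtain ⟨v, k⟩ := p
    by_cases h : t = v
    · simp [consRun, h]; omega
    · simp [consRun, h]

-- A's loop, characterised by runsL
theorem mainA (ts : List Char) : ∀ (parts : List (List Char)) (t : Char) (n : Nat),
    aFinish (ts.foldl aStep' (parts, t, (n : Int) + 1)) =
    parts ++ render (consRun t (n + 1) (runsL ts)) := by
  induction ts with
  | nil =>
    intro parts t n
    simp [aFinish, consRun, render, runsL]
  | cons u ts ih =>
    intro parts t n
    by_cases h : u = t
    · have hstep : aStep' (parts, t, (n : Int) + 1) u = (parts, t, ((n + 1 : Nat) : Int) + 1) := by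
        simp [aStep', h]
      rw [List.foldl_cons, hstep, ih]
      congr 2
      show consRun t (n + 1 + 1) (runsL ts) = consRun t (n + 1) (runsL (u :: ts))
      rw [show runsL (u :: ts) = consRun t 1 (runsL ts) by simp [runsL, h]]
      exact consRun_succ t (n + 1) (runsL ts)
    · have hstep : aStep' (parts, t, (n : Int) + 1) u
          = (parts ++ [t :: PySem.Int.toChars ((n : Int) + 1)], u, ((0 : Nat) : Int) + 1) := by
        simp [aStep', h]
      rw [List.foldl_cons, hstep, ih]
      obtain ⟨k, r, hk⟩ := consRun_ex u 1 (runsL ts)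
      have h' : t ≠ u := fun hh => h hh.symm
      have hrhs : consRun t (n + 1) (runsL (u :: ts)) = (t, n + 1) :: consRun u 1 (runsL ts) := by
        rw [show runsL (u :: ts) = consRun u 1 (runsL ts) from rfl, hk]
        simp [consRun, h']
      rw [hrhs]
      simp [render]

theorem psums_shift (ks : List Nat) : ∀ a : Nat, (psums ks a).map (· + 1) = psums ks (a + 1) := by
  induction ks with
  | nil => intro a; rfl
  | cons k ks ih =>
    intro a
    simp only [psums, List.map_cons, ih]
    rw [show a + k + 1 = a + 1 + k by omega]

-- boundary indices of t :: ts shift by one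
theorem bBnd_cons (t u : Char) (ts : List Char) :
    bBnd (t :: u :: ts) = (if (u != t) = true then [1] else []) ++ (bBnd (u :: ts)).map (· + 1) := by
  unfold bBnd
  have hlen : (t :: u :: ts).length - 1 = ((u :: ts).length - 1) + 1 := by simp
  rw [hlen]
  have hr : List.range' 1 (((u :: ts).length - 1) + 1) = 1 :: List.range' 2 ((u :: ts).length - 1) := by
    rw [List.range'_succ]
  rw [hr, List.filter_cons]
  have hr2 : List.range' 2 ((u :: ts).length - 1) = (List.range' 1 ((u :: ts).length - 1)).map (· + 1) := by
    rw [List.range'_eq_map_range, List.range'_eq_map_range, List.map_map]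
    apply List.map_congr_left
    intro x _; simp; omega
  rw [hr2, List.filter_map]
  have hfc : (List.range' 1 ((u :: ts).length - 1)).filter
        ((fun i => (t :: u :: ts).getD i ' ' != (t :: u :: ts).getD (i - 1) ' ') ∘ (· + 1))
      = (List.range' 1 ((u :: ts).length - 1)).filter
        (fun i => (u :: ts).getD i ' ' != (u :: ts).getD (i - 1) ' ') := by
    apply List.filter_congr
    intro i hi
    have h1 : 1 ≤ i := (List.mem_range'_1.mp hi).1
    obtain ⟨j, rfl⟩ : ∃ j, i = j + 1 := ⟨i - 1, by omega⟩
    simp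
  rw [hfc]
  have hhead : ((t :: u :: ts).getD 1 ' ' != (t :: u :: ts).getD (1 - 1) ' ') = (u != t) := by
    simp
  rw [hhead]
  split <;> simp

-- enc over a shifted cut list drops the head character
theorem shiftEnc (t : Char) (ts : List Char) (l : List Nat) :
    (((l.map (· + 1)).zip ((l.map (· + 1)).drop 1)).map (bEnc (t :: ts)))
      = ((l.zip (l.drop 1)).map (bEnc ts)) := by
  rw [← List.map_drop, List.zip_map, List.map_map]
  apply List.map_congr_left
  intro p _
  obtain ⟨a, b⟩ := p
  simp only [Function.comp_apply, Prod.map_apply, bEnc]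
  have h1 : (t :: ts).getD (a + 1) ' ' = ts.getD a ' ' := by cases a <;> rfl
  rw [h1]
  congr 2
  push_cast
  ring

-- B's staged cut construction, characterised by runsL (with the cut positions = partial run sums)
theorem mainB (ts : List Char) : ∀ t : Char,
    (((bCuts (t :: ts)).zip ((bCuts (t :: ts)).drop 1)).map (bEnc (t :: ts))
        = render (runsL (t :: ts)))
    ∧ (bCuts (t :: ts)).drop 1 = psums ((runsL (t :: ts)).map Prod.snd) 0 := by
  induction ts with
  | nil =>
    intro t
    constructor
    · simp [bCuts, bBnd, runsL, consRun, render, bEnc, List.zip]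
    · simp [bCuts, bBnd, runsL, consRun, psums]
  | cons u ts ih =>
    intro t
    obtain ⟨ihEnc, ihCuts⟩ := ih u
    obtain ⟨k, r, hk⟩ := consRun_ex u 1 (runsL ts)
    have hru : runsL (u :: ts) = (u, k) :: r := hk
    have hD : (bCuts (u :: ts)).drop 1 = k :: psums (r.map Prod.snd) k := by
      rw [ihCuts, hru]; simp [psums]
    have hcuts0 : bCuts (u :: ts) = 0 :: (k :: psums (r.map Prod.snd) k) := by
      have h0 : bCuts (u :: ts) = 0 :: (bCuts (u :: ts)).drop 1 := by simp [bCuts]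
      rw [h0, hD]
    have hnewcuts : bCuts (t :: u :: ts)
        = 0 :: ((if (u != t) = true then [1] else []) ++ ((bCuts (u :: ts)).drop 1).map (· + 1)) := by
      have hdrop : (bCuts (u :: ts)).drop 1 = bBnd (u :: ts) ++ [(u :: ts).length] := by
        simp [bCuts]
      rw [hdrop]
      show 0 :: (bBnd (t :: u :: ts) ++ [(t :: u :: ts).length]) = _
      rw [bBnd_cons, List.map_append, List.append_assoc]
      simp
    -- the tail of the previous cut list, with every index shifted by one
    have hsh : ((k :: psums (r.map Prod.snd) k).map (· + 1))
        = (k + 1) :: psums (r.map Prod.snd) (k + 1) := by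
      simp only [List.map_cons, psums_shift]
    by_cases h : u = t
    · -- same type: the first run grows by one, no new boundary
      subst h
      have h1 : bCuts (u :: u :: ts) = 0 :: (k + 1) :: psums (r.map Prod.snd) (k + 1) := by
        rw [hnewcuts, hD]
        simp only [bne_self_eq_false, Bool.false_eq_true, if_false, List.nil_append, hsh]
      have hrt : runsL (u :: u :: ts) = (u, k + 1) :: r := by
        show consRun u 1 (runsL (u :: ts)) = _
        rw [hru]; simp [consRun, Nat.add_comm]
      -- tail of the IH: the remaining pairs render the remaining runs
      have ihEnc' := ihEnc
      rw [hcuts0] at ihEnc'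
      simp only [List.drop_one, List.tail_cons, List.zip_cons_cons, List.map_cons, hru, render]
        at ihEnc'
      have htail := congrArg List.tail ihEnc'
      simp only [List.tail_cons] at htail
      constructor
      · rw [h1, hrt]
        simp only [List.drop_one, List.tail_cons, List.zip_cons_cons, List.map_cons]
        have hview : ((k + 1) :: psums (r.map Prod.snd) (k + 1)).zip (psums (r.map Prod.snd) (k + 1))
            = (((k :: psums (r.map Prod.snd) k).map (· + 1)).zip
                (((k :: psums (r.map Prod.snd) k).map (· + 1)).drop 1)) := by
          rw [hsh]; rfl
        rw [hview, shiftEnc u (u :: ts) (k :: psums (r.map Prod.snd) k)]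
        simp only [List.drop_one, List.tail_cons] at htail ⊢
        rw [htail]
        simp [render, bEnc]
      · rw [h1, hrt]
        simp only [List.drop_one, List.tail_cons, psums, List.map_cons]
        rw [show (0 : Nat) + (k + 1) = k + 1 by omega]
    · -- new type: a fresh boundary at index 1, everything else shifts
      have hif : (u != t) = true := by simp [h]
      rw [hif] at hnewcuts
      simp only [if_true, List.singleton_append] at hnewcuts
      have h' : t ≠ u := fun hh => h hh.symm
      have hrt : runsL (t :: u :: ts) = (t, 1) :: (u, k) :: r := by
        show consRun t 1 (runsL (u :: ts)) = _
        rw [hru]; simp [consRun, h']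
      have h1 : bCuts (t :: u :: ts) = 0 :: (bCuts (u :: ts)).map (· + 1) := by
        rw [hnewcuts, hcuts0]
        simp
      constructor
      · have hx : (bCuts (u :: ts)).map (· + 1)
            = 1 :: ((k + 1) :: psums (r.map Prod.snd) (k + 1)) := by
          rw [hcuts0]
          simp only [List.map_cons, hsh]
        have hsE := shiftEnc t (u :: ts) (bCuts (u :: ts))
        rw [hx] at hsE
        simp only [List.drop_one, List.tail_cons] at hsE
        simp only [List.drop_one] at ihEnc
        rw [h1, hx, List.drop_one, List.tail_cons, List.zip_cons_cons, List.map_cons]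
        rw [hsE, ihEnc, hrt]
        simp [render, bEnc, hru]
      · rw [h1, hrt]
        simp only [List.drop_one, List.tail_cons, psums, List.map_cons]
        rw [hcuts0]
        simp only [List.map_cons, hsh]
        rw [show (0 : Nat) + 1 = 1 by rfl]
        rw [show (0 : Nat) + 1 + k = k + 1 by omega]

-- ===== VERDICT (by name: the statement is the Claim_ definition above) =====
theorem extract_structure_pattern_spec : Claim_equal_extract_structure_pattern := by
  intro password _
  unfold Spec_extract_structure_pattern extract_structure_pattern extract_structure_pattern_alt
  cases hp : PySem.Chars.strip password.toList with
  | nil => simp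
  | cons c rest =>
    simp only [List.map_cons, if_neg (List.cons_ne_nil c rest)]
    have hA : rest.foldl aStep ([], get_char_type c, 1)
        = (rest.map get_char_type).foldl aStep' ([], get_char_type c, ((0 : Nat) : Int) + 1) := by
      rw [List.foldl_map]; rfl
    have hmainA := mainA (rest.map get_char_type) [] (get_char_type c) 0
    have hrun : consRun (get_char_type c) (0 + 1) (runsL (rest.map get_char_type))
        = runsL (get_char_type c :: rest.map get_char_type) := rfl
    have hB := (mainB (rest.map get_char_type) (get_char_type c)).1
    congr 1
    show String.ofList (aFinish (rest.foldl aStep ([], get_char_type c, 1))).flatten = _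
    rw [hA, hmainA, hrun, List.nil_append, ← hB]
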